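-- pv_equiv track=rewrite | github.com/polymorphisma/fastapi-alembic-poetry-cognito-template | app/utilities/_entropy.py | adjust_length_for_common_patterns
-- ===== SOURCE A (Python) =====
-- def adjust_length_for_common_patterns(password: str) -> int:
--     """
--     Adjust the length of the password for common patterns.
--
--     This function reduces the length of the password if common sequences
--     or repeated characters are found, which decreases the effective entropy.
--
--     Args:
--         password (str): The password string for which the length is to be adjusted.
--
--     Returns:
--         int: The adjusted length of the password.
--     """
--     sequences = [
--         "0123456789", "qwertyuiop", "asdfghjkl", "zxcvbnm",
--         "abcdefghijklmnopqrstuvwxyz"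
--     ]
--     length = len(password)
--     same_char_count = 1
--     for i in range(1, length):
--         if password[i] == password[i-1]:
--             same_char_count += 1
--         else:
--             if same_char_count > 2:
--                 length -= same_char_count - 2
--             same_char_count = 1
--     if same_char_count > 2:
--         length -= same_char_count - 2
--
--     lower_password = password.lower()
--     for seq in sequences:
--         if seq in lower_password or seq[::-1] in lower_password:
--             length -= len(seq) - 2
--             break
--
--     return length
-- ===== SOURCE B (Python) =====
-- def adjust_length_for_common_patterns(password: str) -> int:
--     """Same adjusted-length estimate, run-at-a-time instead of char-at-a-time:
--     the string is repeatedly split at the end of its leading run with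
--     str.lstrip, deducting run-2 for each run longer than 2 (no per-character
--     counter state); the first matching keyboard/alphabet sequence (forward or
--     reversed) is found with next() instead of a loop-with-break."""
--     sequences = [
--         "0123456789", "qwertyuiop", "asdfghjkl", "zxcvbnm",
--         "abcdefghijklmnopqrstuvwxyz"
--     ]
--     length = len(password)
--     s = password
--     while s:
--         rest = s.lstrip(s[0])
--         run = len(s) - len(rest)
--         if run > 2:
--             length -= run - 2
--         s = rest
--
--     lower_password = password.lower()
--     hit = next(
--         (q for q in sequences
--          if q in lower_password or q[::-1] in lower_password),
--         None,
--     )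
--     if hit is not None:
--         length -= len(hit) - 2
--     return length
-- ===== Notes on version B (the rewrite author's own statement) =====
-- stated objective: alternative
-- what changed: The per-character scan with a same_char_count accumulator is replaced by a run-at-a-time loop that repeatedly strips the leading run with str.lstrip and deducts run-2 per long run (trading speed: each lstrip copies the remaining tail), and the loop-with-break over sequences by a first-match search (next/find?).
import Mathlib
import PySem

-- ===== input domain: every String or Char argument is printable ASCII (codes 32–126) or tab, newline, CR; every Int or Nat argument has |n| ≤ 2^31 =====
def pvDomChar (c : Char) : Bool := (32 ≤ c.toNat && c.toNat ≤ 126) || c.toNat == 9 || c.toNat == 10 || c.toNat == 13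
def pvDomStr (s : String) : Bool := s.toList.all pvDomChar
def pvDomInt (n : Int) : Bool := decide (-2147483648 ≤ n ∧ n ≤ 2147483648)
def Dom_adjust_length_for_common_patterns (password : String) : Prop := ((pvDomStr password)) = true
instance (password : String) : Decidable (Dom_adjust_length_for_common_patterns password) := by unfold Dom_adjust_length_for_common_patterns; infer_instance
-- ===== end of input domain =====

-- B replaces the per-character counter loop by a run-at-a-time loop that strips the leading
-- run with lstrip, and the break-loop over sequences by a first-match search (objective: alternative).

-- ===== PORT A =====
-- loop body of A's 'for i in range(1, length)': state (length, same_char_count)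
def pvStepA (g : Int → Option Char) (st : Int × Int) (i : Int) : Int × Int :=
  if g i == g (i - 1) then (st.1, st.2 + 1)
  else (if st.2 > 2 then st.1 - (st.2 - 2) else st.1, 1)

-- A's 'for seq in sequences: … break' (the break = stop at the first hit);
-- 'seq[::-1]' is the reversal of the character list
def pvSeqLoopA (lowerp : String) (length : Int) : List String → Int
  | [] => length
  | s :: rest =>
    if PySem.Str.isIn s lowerp || PySem.Str.isIn (String.ofList s.toList.reverse) lowerp then
      length - (PySem.Str.len s - 2)
    else pvSeqLoopA lowerp length rest

def adjust_length_for_common_patterns (password : String) : Int :=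
  let sequences : List String :=
    ["0123456789", "qwertyuiop", "asdfghjkl", "zxcvbnm", "abcdefghijklmnopqrstuvwxyz"]
  let length0 : Int := PySem.Str.len password
  let st := (PySem.List.pyRange 1 (PySem.Str.len password) 1).foldl
    (pvStepA (fun i => PySem.Str.pyGet? password i)) (length0, 1)
  let length1 : Int := if st.2 > 2 then st.1 - (st.2 - 2) else st.1
  pvSeqLoopA (PySem.Str.lower password) length1 sequences

-- ===== PORT B =====
-- B's 'while s: rest = s.lstrip(s[0]); …' — lstrip with the ONE-character set {s[0]} is
-- exactly dropWhile (· == s[0]) on the character list (ported by hand, exact for a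
-- single-character strip set); 'run = len(s) - len(rest)'
def pvStripLoop (length : Int) (s : List Char) : Int :=
  match s with
  | [] => length
  | c :: t =>
    let rest := List.dropWhile (fun ch => ch == c) (c :: t)
    let run : Int := ((c :: t).length : Int) - (rest.length : Int)
    pvStripLoop (if run > 2 then length - (run - 2) else length) rest
termination_by s.length
decreasing_by
  have h := List.length_dropWhile_le (fun ch => ch == c) t
  simp only [List.dropWhile_cons, beq_self_eq_true, if_true, List.length_cons]
  omega

def adjust_length_for_common_patterns_alt (password : String) : Int :=
  let sequences : List String :=
    ["0123456789", "qwertyuiop", "asdfghjkl", "zxcvbnm", "abcdefghijklmnopqrstuvwxyz"]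
  let length0 : Int := PySem.Str.len password
  let length1 := pvStripLoop length0 password.toList
  let lowerp := PySem.Str.lower password
  match sequences.find? (fun s =>
      PySem.Str.isIn s lowerp || PySem.Str.isIn (String.ofList s.toList.reverse) lowerp) with
  | some s => length1 - (PySem.Str.len s - 2)
  | none => length1

-- ===== PRECONDITION & SPEC =====
def Spec_adjust_length_for_common_patterns (password : String) (out : Int) : Prop := out = adjust_length_for_common_patterns_alt password
instance (password : String) (out : Int) : Decidable (Spec_adjust_length_for_common_patterns password out) := by unfold Spec_adjust_length_for_common_patterns; infer_instance

-- ===== CLAIM (what is proved, stated in full; the proofs are below) =====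
def Claim_equal_adjust_length_for_common_patterns : Prop := ∀ (password : String), Dom_adjust_length_for_common_patterns password → Spec_adjust_length_for_common_patterns password (adjust_length_for_common_patterns password)

-- ===== LEMMAS AND PROOFS =====

-- A's trailing flush 'if same_char_count > 2: length -= same_char_count - 2'
def pvFlush (st : Int × Int) : Int := if st.2 > 2 then st.1 - (st.2 - 2) else st.1

-- A's index loop rephrased over adjacent characters (prev = previous character)
def pvFoldPairs (st : Int × Int) (prev : Char) : List Char → Int × Int
  | [] => st
  | c :: t => pvFoldPairs (if c == prev then (st.1, st.2 + 1) else (pvFlush st, 1)) c t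

lemma pvBridge (l : List Char) :
    ∀ (m k : Nat) (st : Int × Int) (hk : k + 1 + m = l.length),
      (PySem.List.pyRange ((k : Int) + 1) (l.length : Int) 1).foldl
          (pvStepA (fun i => PySem.List.pyGet? l i)) st =
        pvFoldPairs st (l[k]'(by omega)) (l.drop (k + 1)) := by
  intro m
  induction m with
  | zero =>
    intro k st hk
    have h1 : ((k : Int) + 1) = (l.length : Int) := by omega
    rw [h1, PySem.List.pyRange_one_eq_nil (by omega)]
    rw [List.drop_eq_nil_of_le (by omega)]
    rfl
  | succ m ih =>
    intro k st hk
    have hklt : k + 1 < l.length := by omega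
    have hcons : PySem.List.pyRange ((k : Int) + 1) (l.length : Int) 1 =
        ((k : Int) + 1) :: PySem.List.pyRange ((k : Int) + 1 + 1) (l.length : Int) 1 :=
      PySem.List.pyRange_one_cons (by omega)
    rw [hcons, List.foldl_cons]
    have hg1 : PySem.List.pyGet? l ((k : Int) + 1) = some (l[k + 1]'hklt) := by
      have : ((k : Int) + 1) = ((k + 1 : Nat) : Int) := by push_cast; ring
      rw [this, PySem.List.pyGet?_natCast, List.getElem?_eq_getElem hklt]
    have hg0 : PySem.List.pyGet? l ((k : Int) + 1 - 1) = some (l[k]'(by omega)) := by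
      have : ((k : Int) + 1 - 1) = ((k : Nat) : Int) := by omega
      rw [this, PySem.List.pyGet?_natCast, List.getElem?_eq_getElem (by omega)]
    have hstep : pvStepA (fun i => PySem.List.pyGet? l i) st ((k : Int) + 1) =
        (if (l[k + 1]'hklt) == (l[k]'(by omega)) then (st.1, st.2 + 1) else (pvFlush st, 1)) := by
      simp only [pvStepA, pvFlush, hg1, hg0]
      by_cases h : (l[k + 1]'hklt) == (l[k]'(by omega)) <;> simp [h]
    have hdrop : l.drop (k + 1) = (l[k + 1]'hklt) :: l.drop (k + 1 + 1) :=
      List.drop_eq_getElem_cons hklt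
    have hcast : ((k : Int) + 1 + 1) = ((k + 1 : Nat) : Int) + 1 := by push_cast; ring
    rw [hstep, hdrop, hcast, ih (k + 1) _ (by omega)]
    rfl

lemma pvDropWhile_replicate_append (c : Char) (r : List Char) :
    ∀ k : Nat, List.dropWhile (fun ch => ch == c) (List.replicate k c ++ r) =
      List.dropWhile (fun ch => ch == c) r := by
  intro k
  induction k with
  | zero => simp
  | succ k ih => simp [List.replicate_succ, ih]

lemma pvMain :
    ∀ (t : List Char) (prev : Char) (L : Int) (cnt : Nat), 1 ≤ cnt →
      pvFlush (pvFoldPairs (L, (cnt : Int)) prev t) =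
        pvStripLoop L (List.replicate cnt prev ++ t) := by
  intro t
  induction t with
  | nil =>
    intro prev L cnt hcnt
    obtain ⟨k, rfl⟩ : ∃ k, cnt = k + 1 := ⟨cnt - 1, by omega⟩
    simp only [pvFoldPairs, List.append_nil]
    rw [List.replicate_succ, pvStripLoop]
    have hrest : List.dropWhile (fun ch => ch == prev) (prev :: List.replicate k prev) = [] := by
      have h := pvDropWhile_replicate_append prev [] (k + 1)
      simp only [List.replicate_succ, List.append_nil] at h
      simp [h]
    rw [hrest]
    simp only [List.length_cons, List.length_replicate, List.length_nil]
    rw [pvStripLoop]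
    simp only [pvFlush]
    split_ifs with h1 h2 h2 <;> first | rfl | omega
  | cons c t' ih =>
    intro prev L cnt hcnt
    by_cases hc : (c == prev) = true
    · have hceq : c = prev := by simpa using hc
      subst hceq
      simp only [pvFoldPairs, hc, if_true]
      have hcast : ((cnt : Int) + 1) = ((cnt + 1 : Nat) : Int) := by push_cast; ring
      rw [hcast, ih c L (cnt + 1) (by omega)]
      congr 1
      rw [List.replicate_succ']
      simp
    · have hne : (c == prev) = false := by simpa using Bool.eq_false_iff.mpr hc
      simp only [pvFoldPairs, hne, Bool.false_eq_true, if_false]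
      have h1 := ih c (pvFlush (L, (cnt : Int))) 1 le_rfl
      simp only [Nat.cast_one, List.replicate_one, List.singleton_append] at h1
      rw [h1]
      -- RHS: one step of pvStripLoop on replicate cnt prev ++ c :: t'
      obtain ⟨k, rfl⟩ : ∃ k, cnt = k + 1 := ⟨cnt - 1, by omega⟩
      conv_rhs => rw [List.replicate_succ, List.cons_append, pvStripLoop]
      have hrest : List.dropWhile (fun ch => ch == prev)
          (prev :: (List.replicate k prev ++ c :: t')) = c :: t' := by
        have := pvDropWhile_replicate_append prev (c :: t') (k + 1)
        simp only [List.replicate_succ, List.cons_append] at this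
        rw [this, List.dropWhile_cons]
        have : (c == prev) = false := hne
        simp [this]
      rw [hrest]
      simp only [List.length_cons, List.length_append, List.length_replicate]
      congr 1
      simp only [pvFlush]
      push_cast
      split_ifs with h1' h2' h2' <;> first | rfl | omega

lemma pvPhase1 (l : List Char) :
    (if ((PySem.List.pyRange 1 (l.length : Int) 1).foldl
          (pvStepA (fun i => PySem.List.pyGet? l i)) ((l.length : Int), 1)).2 > 2
      then ((PySem.List.pyRange 1 (l.length : Int) 1).foldl
          (pvStepA (fun i => PySem.List.pyGet? l i)) ((l.length : Int), 1)).1 -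
        (((PySem.List.pyRange 1 (l.length : Int) 1).foldl
          (pvStepA (fun i => PySem.List.pyGet? l i)) ((l.length : Int), 1)).2 - 2)
      else ((PySem.List.pyRange 1 (l.length : Int) 1).foldl
          (pvStepA (fun i => PySem.List.pyGet? l i)) ((l.length : Int), 1)).1) =
      pvStripLoop (l.length : Int) l := by
  match l with
  | [] =>
    rw [PySem.List.pyRange_one_eq_nil (by simp)]
    simp [pvStripLoop]
  | c :: t =>
    have hb := pvBridge (c :: t) t.length 0 (((c :: t).length : Int), 1) (by simp; omega)
    have h0 : ((0 : Nat) : Int) + 1 = 1 := by norm_num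
    rw [h0] at hb
    rw [hb]
    have hm := pvMain t c ((c :: t).length : Int) 1 le_rfl
    simp only [Nat.cast_one, List.replicate_one, List.singleton_append] at hm
    simpa [pvFlush] using hm

lemma pvSeqLoopA_eq (lowerp : String) (length : Int) (seqs : List String) :
    pvSeqLoopA lowerp length seqs =
      match seqs.find? (fun s =>
          PySem.Str.isIn s lowerp || PySem.Str.isIn (String.ofList s.toList.reverse) lowerp) with
      | some s => length - (PySem.Str.len s - 2)
      | none => length := by
  induction seqs with
  | nil => rfl
  | cons s rest ih =>
    by_cases h : (PySem.Str.isIn s lowerp || PySem.Str.isIn (String.ofList s.toList.reverse) lowerp) = true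
    · simp only [pvSeqLoopA, List.find?_cons, h, if_true]
    · have hf : (PySem.Str.isIn s lowerp || PySem.Str.isIn (String.ofList s.toList.reverse) lowerp) = false :=
        Bool.eq_false_iff.mpr h
      simp only [pvSeqLoopA, List.find?_cons, hf, Bool.false_eq_true, if_false]
      exact ih

-- ===== VERDICT (by name: the statement is the Claim_ definition above) =====
theorem adjust_length_for_common_patterns_spec : Claim_equal_adjust_length_for_common_patterns := by
  intro password _
  unfold Spec_adjust_length_for_common_patterns
  unfold adjust_length_for_common_patterns adjust_length_for_common_patterns_alt
  rw [pvSeqLoopA_eq]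
  simp only [PySem.Str.pyGet?_eq, PySem.Str.len_eq, PySem.Chars.pyGet?]
  rw [pvPhase1 password.toList]
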